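-- pv_equiv track=rewrite | github.com/gFrincu/AdventOfCode | 2024/day4.py | find_horizontally
-- ===== SOURCE A (Python) =====
-- def find_horizontally(matrix, word):
--     rows = len(matrix)
--     horizontal_count = 0
--
--     # a loop to go through the rows
--     for i in range(rows):
--         # Convert the row into a string
--         row_string = ''.join(matrix[i])
--         # Search the word from left to right
--         index = row_string.find(word)
--         while index != -1:
--             horizontal_count += 1
--             index = row_string.find(word, index + 1)
--         # Search the word from right to left
--         reversed_word = word[::-1]
--         index = row_string.find(reversed_word)
--         while index != -1:
--             horizontal_count += 1
--             index = row_string.find(reversed_word, index + 1)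
--
--     return horizontal_count
-- ===== SOURCE B (Python) =====
-- def find_horizontally(matrix, word):
--     def occurrences(s, w):
--         # streaming DP: dp[i] is True iff w[:i] is a suffix of the text read so far;
--         # a full match ends at the current position exactly when dp[len(w)] holds
--         m = len(w)
--         dp = [True] + [False] * m
--         count = 1 if dp[m] else 0
--         for c in s:
--             dp = [True] + [dp[i] and c == w[i] for i in range(m)]
--             if dp[m]:
--                 count += 1
--         return count
--
--     rev = word[::-1]
--     total = 0
--     for row in matrix:
--         s = ''.join(row)
--         total += occurrences(s, word) + occurrences(s, rev)
--     return total
-- ===== Notes on version B (the rewrite author's own statement) =====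
-- stated objective: alternative
-- what changed: Replaces A's repeated str.find jumping scans (a while loop re-calling find from each match, once for the word and once for its reverse) with a streaming dynamic program: each row string is consumed character by character while maintaining a boolean vector dp where dp[i] says word[:i] is a suffix of the text read so far, counting a match whenever dp[len(word)] holds.
import Mathlib
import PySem

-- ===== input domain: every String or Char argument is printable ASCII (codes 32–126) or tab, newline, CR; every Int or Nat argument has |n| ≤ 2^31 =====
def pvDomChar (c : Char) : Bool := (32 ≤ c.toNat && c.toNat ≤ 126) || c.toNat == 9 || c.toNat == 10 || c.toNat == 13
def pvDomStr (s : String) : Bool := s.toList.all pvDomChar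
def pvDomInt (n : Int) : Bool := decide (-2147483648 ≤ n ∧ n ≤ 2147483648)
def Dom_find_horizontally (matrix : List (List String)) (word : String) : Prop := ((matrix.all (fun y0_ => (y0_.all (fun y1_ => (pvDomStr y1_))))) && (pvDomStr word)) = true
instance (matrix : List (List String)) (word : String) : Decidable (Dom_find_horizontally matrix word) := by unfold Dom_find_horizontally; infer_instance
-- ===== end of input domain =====

-- B replaces A's repeated str.find jumping scans with a streaming dynamic program over a
-- matched-prefix boolean vector (objective: alternative).

-- ===== PORT A =====
-- A's 'index = s.find(w); while index != -1: count += 1; index = s.find(w, index+1)' as a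
-- fuel recursion returning the number of iterations; fuel s.length + 2 exceeds the at most
-- s.length + 1 matches, so the fuel never runs out (a totality guard, not an algorithm change).
def pvCountOcc (fuel : Nat) (s w : List Char) (start : Int) : Int :=
  match fuel with
  | 0 => 0
  | f+1 =>
    let idx := PySem.Chars.findFrom s w start none
    if idx = -1 then 0 else 1 + pvCountOcc f s w (idx + 1)

def find_horizontally (matrix : List (List String)) (word : String) : Int :=
  let rows : Int := matrix.length
  (PySem.List.pyRange 0 rows 1).foldl (fun acc i =>
    let row := PySem.List.pyGetD matrix i []
    let s := (PySem.Str.join "" row).toList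
    let acc := acc + pvCountOcc (s.length + 2) s word.toList 0
    -- reversed_word = word[::-1]; the step is the literal -1, so slice? is always `some`
    let rev := (PySem.List.slice? word.toList none none (-1)).getD word.toList
    acc + pvCountOcc (s.length + 2) s rev 0) 0

-- ===== PORT B =====
-- B's occurrences(s, w): dp has length len(w)+1 and i ranges below len(w), so the Python
-- indexings dp[m], dp[i], w[i] are always in range; getD with a default is exact there.
def pvOcc (s wl : List Char) : Int :=
  let m := wl.length
  let dp0 : List Bool := true :: List.replicate m false
  let count0 : Int := if dp0.getD m false then 1 else 0
  (s.foldl (fun (st : List Bool × Int) c =>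
      let dp := true :: (List.range m).map (fun i => st.1.getD i false && (c == wl.getD i ' '))
      (dp, if dp.getD m false then st.2 + 1 else st.2)) (dp0, count0)).2

def find_horizontally_alt (matrix : List (List String)) (word : String) : Int :=
  -- rev = word[::-1]; the step is the literal -1, so slice? is always `some`
  let rev := (PySem.List.slice? word.toList none none (-1)).getD word.toList
  matrix.foldl (fun total row =>
    let s := (PySem.Str.join "" row).toList
    total + pvOcc s word.toList + pvOcc s rev) 0

-- ===== PRECONDITION & SPEC =====
def Spec_find_horizontally (matrix : List (List String)) (word : String) (out : Int) : Prop := out = find_horizontally_alt matrix word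
instance (matrix : List (List String)) (word : String) (out : Int) : Decidable (Spec_find_horizontally matrix word out) := by unfold Spec_find_horizontally; infer_instance

-- ===== CLAIM (what is proved, stated in full; the proofs are below) =====
def Claim_equal_find_horizontally : Prop := ∀ (matrix : List (List String)) (word : String), Dom_find_horizontally matrix word → Spec_find_horizontally matrix word (find_horizontally matrix word)

-- ===== LEMMAS AND PROOFS =====

-- occurrence-position predicate: the word starts at index i of s
def pvP (s w : List Char) (i : Nat) : Bool := decide (w <+: s.drop i)

-- ---- A side: the find/while loop counts the occurrence positions ----
lemma pvFindFrom_past (s w : List Char) :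
    PySem.Chars.findFrom s w ((s.length : Int) + 1) none = -1 := by
  simp only [PySem.Chars.findFrom]
  split_ifs <;> omega
lemma pvNoOcc (s w : List Char) (k i : Nat) (hki : k ≤ i)
    (hninf : ¬ w <:+: s.drop k) : pvP s w i = false := by
  simp only [pvP, decide_eq_false_iff_not]
  intro hpre
  exact hninf (List.IsInfix.trans hpre.isInfix
    (by rw [show s.drop i = (s.drop k).drop (i - k) by rw [List.drop_drop]; congr 1; omega]
        exact (List.drop_suffix _ _).isInfix))
lemma pvCountOcc_eq (s w : List Char) :
    ∀ (fuel k : Nat), k ≤ s.length + 1 → s.length + 2 - k ≤ fuel →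
    pvCountOcc fuel s w (k : Int) = ((List.range' k (s.length + 1 - k)).countP (pvP s w) : Int) := by
  intro fuel
  induction fuel with
  | zero => intro k hk hf; omega
  | succ f ih =>
    intro k hk hf
    by_cases hk1 : k = s.length + 1
    · subst hk1
      simp only [pvCountOcc]
      rw [show ((s.length + 1 : Nat) : Int) = (s.length : Int) + 1 by push_cast; ring,
        pvFindFrom_past]
      simp
    · have hk' : k ≤ s.length := by omega
      simp only [pvCountOcc]
      rw [PySem.Chars.findFrom_natCast s w k hk']
      by_cases hfind : PySem.Chars.find (s.drop k) w = -1
      · rw [if_pos hfind, if_pos rfl]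
        have hninf : ¬ w <:+: s.drop k := (PySem.Chars.find_eq_neg_one_iff _ _).mp hfind
        rw [List.countP_eq_zero.mpr]
        · simp
        · intro i hi
          rw [List.mem_range'_1] at hi
          simp [pvNoOcc s w k i hi.1 hninf]
      · rw [if_neg hfind]
        have hj0 : 0 ≤ PySem.Chars.find (s.drop k) w := by
          have := PySem.Chars.neg_one_le_find (s.drop k) w; omega
        have hjlen := PySem.Chars.find_le_length (s.drop k) w
        have spec := PySem.Chars.find_spec hj0
        set j := PySem.Chars.find (s.drop k) w with hj
        rw [if_neg (by omega)]
        set m := k + j.toNat with hm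
        have hmlen : m ≤ s.length := by
          have : (s.drop k).length = s.length - k := by simp
          omega
        have hrec : (k : Int) + j + 1 = ((m + 1 : Nat) : Int) := by
          push_cast [hm, Int.toNat_of_nonneg hj0]; ring
        rw [hrec, ih (m+1) (by omega) (by omega)]
        have hsplit : List.range' k (s.length + 1 - k)
            = List.range' k (m - k) ++ List.range' m (s.length + 1 - m) := by
          rw [show List.range' m (s.length + 1 - m) = List.range' (k + 1 * (m - k)) (s.length + 1 - m) by
                congr 1; omega,
            List.range'_append]
          congr 1; omega
        have hpm : pvP s w m = true := by
          simp only [pvP, decide_eq_true_eq]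
          have := spec.1
          rwa [List.drop_drop, ← hm] at this
        have hzero : (List.range' k (m - k)).countP (pvP s w) = 0 := by
          rw [List.countP_eq_zero]
          intro i hi
          rw [List.mem_range'_1] at hi
          simp only [pvP, decide_eq_true_eq]
          intro hpre
          refine spec.2 (i - k) (by omega) ?_
          rwa [List.drop_drop, show k + (i - k) = i by omega]
        rw [hsplit, List.countP_append, hzero,
          show s.length + 1 - m = (s.length - m) + 1 by omega, List.range'_succ,
          List.countP_cons, hpm]
        push_cast
        have : k + 1 * (m - k) = m := by omega
        simp
        ring

lemma pvCountOcc_zero (s u : List Char) :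
    pvCountOcc (s.length + 2) s u 0 = ((List.range (s.length + 1)).countP (pvP s u) : Int) := by
  rw [show (0 : Int) = ((0 : Nat) : Int) by simp,
    pvCountOcc_eq s u (s.length + 2) 0 (by omega) (by omega)]
  simp [← List.range_eq_range']

-- ---- B side: the dp vector after reading p ----
def pvDp (wl p : List Char) : List Bool :=
  (List.range (wl.length + 1)).map (fun i => decide (wl.take i <:+ p))

lemma pvDp_getD (wl p : List Char) (i : Nat) (h : i ≤ wl.length) :
    (pvDp wl p).getD i false = decide (wl.take i <:+ p) := by
  unfold pvDp
  rw [List.getD_eq_getElem?_getD, List.getElem?_map, List.getElem?_range (by omega)]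
  simp

lemma pvDp_nil (wl : List Char) : pvDp wl [] = true :: List.replicate wl.length false := by
  unfold pvDp
  rw [List.range_succ_eq_map, List.map_cons, List.map_map]
  cases wl with
  | nil => simp
  | cons a l =>
    refine congrArg₂ _ (by simp) ?_
    rw [List.eq_replicate_iff]
    refine ⟨by simp, ?_⟩
    intro b hb
    rw [List.mem_map] at hb
    obtain ⟨i, hi, rfl⟩ := hb
    simp [Function.comp, List.suffix_nil]

lemma pvSuffix_concat (a b : List Char) (x y : Char) :
    (a ++ [x]) <:+ (b ++ [y]) ↔ a <:+ b ∧ x = y := by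
  rw [← List.reverse_prefix]
  simp only [List.reverse_append, List.reverse_cons, List.reverse_nil, List.nil_append,
    List.singleton_append, List.cons_prefix_cons, List.reverse_prefix]
  tauto

lemma pvDp_step (wl p : List Char) (c : Char) :
    (true :: (List.range wl.length).map
      (fun i => (pvDp wl p).getD i false && (c == wl.getD i ' ')))
    = pvDp wl (p ++ [c]) := by
  have hmap : (List.range wl.length).map
        (fun i => (pvDp wl p).getD i false && (c == wl.getD i ' '))
      = (List.range wl.length).map (fun i => decide (wl.take (i + 1) <:+ p ++ [c])) := by
    apply List.map_congr_left
    intro i hi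
    rw [List.mem_range] at hi
    rw [pvDp_getD wl p i (by omega)]
    have htake : wl.take (i + 1) = wl.take i ++ [wl[i]] := by
      rw [List.take_add_one, List.getElem?_eq_getElem hi]
      rfl
    have hgd : wl.getD i ' ' = wl[i] := by
      rw [List.getD_eq_getElem?_getD, List.getElem?_eq_getElem hi]
      rfl
    rw [htake, hgd, Bool.eq_iff_iff]
    simp only [Bool.and_eq_true, decide_eq_true_eq, pvSuffix_concat, beq_iff_eq]
    tauto
  rw [hmap]
  unfold pvDp
  rw [List.range_succ_eq_map, List.map_cons, List.map_map]
  refine congrArg₂ _ (by simp) ?_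
  apply List.map_congr_left
  intro i _
  rfl

lemma pvOcc_fold (wl : List Char) (rest : List Char) :
    ∀ (p : List Char) (cnt : Int),
    (rest.foldl (fun (st : List Bool × Int) c =>
        let dp := true :: (List.range wl.length).map
          (fun i => st.1.getD i false && (c == wl.getD i ' '))
        (dp, if dp.getD wl.length false then st.2 + 1 else st.2)) (pvDp wl p, cnt)).2
    = cnt + ((List.range rest.length).countP
        (fun k => decide (wl <:+ p ++ rest.take (k + 1))) : Int) := by
  induction rest with
  | nil => intro p cnt; simp
  | cons c rest' ih =>
    intro p cnt
    rw [List.foldl_cons]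
    simp only [pvDp_step wl p c]
    rw [ih (p ++ [c])]
    have hm : (pvDp wl (p ++ [c])).getD wl.length false = decide (wl <:+ p ++ [c]) := by
      rw [pvDp_getD wl _ wl.length (le_refl _), List.take_length]
    rw [hm]
    rw [List.length_cons, List.range_succ_eq_map, List.countP_cons, List.countP_map]
    have hc : ((List.range rest'.length).countP
          ((fun k => decide (wl <:+ p ++ (c :: rest').take (k + 1))) ∘ Nat.succ))
        = (List.range rest'.length).countP (fun k => decide (wl <:+ (p ++ [c]) ++ rest'.take (k + 1))) := by
      apply List.countP_congr
      intro k _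
      simp only [Function.comp, Nat.succ_eq_add_one, List.take_succ_cons]
      rw [Bool.eq_iff_iff]
      simp only [decide_eq_true_eq]
      rw [List.append_cons]
      tauto
    rw [hc]
    simp only [Nat.zero_add, List.take_succ_cons, List.take_zero]
    by_cases hsuf : wl <:+ p ++ [c]
    · simp [hsuf]
      ring
    · simp [hsuf]

lemma pvOcc_eq (s wl : List Char) :
    pvOcc s wl = ((List.range (s.length + 1)).countP
        (fun j => decide (wl <:+ s.take j)) : Int) := by
  unfold pvOcc
  simp only []
  rw [show (true :: List.replicate wl.length false) = pvDp wl [] from (pvDp_nil wl).symm]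
  rw [pvOcc_fold wl s []]
  rw [pvDp_getD wl [] wl.length (le_refl _), List.take_length]
  rw [List.range_succ_eq_map, List.countP_cons, List.countP_map]
  have hc : ((List.range s.length).countP ((fun j => decide (wl <:+ s.take j)) ∘ Nat.succ))
      = (List.range s.length).countP (fun k => decide (wl <:+ [] ++ s.take (k + 1))) := by
    apply List.countP_congr
    intro k _
    simp
  rw [hc]
  simp only [List.take_zero]
  by_cases hsuf : wl <:+ ([] : List Char)
  · simp [hsuf]
    ring
  · simp [hsuf]

-- ---- the shift: match END positions (B) are the match START positions (A) shifted by |wl| ----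
lemma pvShift (s wl : List Char) :
    ((List.range (s.length + 1)).countP (fun j => decide (wl <:+ s.take j)))
    = (List.range (s.length + 1)).countP (pvP s wl) := by
  by_cases hmn : wl.length ≤ s.length
  · have hz1 : (List.range wl.length).countP (fun j => decide (wl <:+ s.take j)) = 0 := by
      rw [List.countP_eq_zero]
      intro j hj
      rw [List.mem_range] at hj
      simp only [decide_eq_true_eq]
      intro h
      have := h.length_le
      simp only [List.length_take] at this
      omega
    have hz2 : ((List.range wl.length).map (fun x => s.length - wl.length + 1 + x)).countP
        (pvP s wl) = 0 := by
      rw [List.countP_map, List.countP_eq_zero]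
      intro a ha
      rw [List.mem_range] at ha
      simp only [Function.comp, pvP, decide_eq_true_eq]
      intro h
      have := h.length_le
      simp only [List.length_drop] at this
      omega
    have hL : (List.range (s.length + 1)).countP (fun j => decide (wl <:+ s.take j))
        = (List.range (s.length + 1 - wl.length)).countP
            (fun i => decide (wl <:+ s.take (wl.length + i))) := by
      conv_lhs => rw [show s.length + 1 = wl.length + (s.length + 1 - wl.length) by omega]
      rw [List.range_add, List.countP_append, hz1, List.countP_map, Nat.zero_add]
      apply List.countP_congr
      intro i _
      rfl
    have hR : (List.range (s.length + 1)).countP (pvP s wl)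
        = (List.range (s.length - wl.length + 1)).countP (pvP s wl) := by
      conv_lhs => rw [show s.length + 1 = (s.length - wl.length + 1) + wl.length by omega]
      rw [List.range_add, List.countP_append, hz2, Nat.add_zero]
    rw [hL, hR, show s.length + 1 - wl.length = s.length - wl.length + 1 by omega]
    apply List.countP_congr
    intro i hi
    rw [List.mem_range] at hi
    have hile : i ≤ s.length - wl.length := by omega
    have htake : s.take (wl.length + i) = s.take i ++ (s.drop i).take wl.length := by
      rw [Nat.add_comm, List.take_add]
    have hlent : ((s.drop i).take wl.length).length = wl.length := by
      simp only [List.length_take, List.length_drop]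
      omega
    have key : (wl <:+ s.take (wl.length + i)) ↔ wl <+: s.drop i := by
      rw [htake]
      constructor
      · rintro ⟨u, hu⟩
        have h2 := List.append_inj' hu (by rw [hlent])
        rw [h2.2]
        exact List.take_prefix _ _
      · intro h
        have hw : wl = (s.drop i).take wl.length := List.prefix_iff_eq_take.mp h
        nth_rewrite 1 [hw]
        exact List.suffix_append _ _
    simp only [pvP]
    rw [Bool.eq_iff_iff]
    simp only [decide_eq_true_eq, iff_true]
    exact key
  · rw [List.countP_eq_zero.mpr, List.countP_eq_zero.mpr]
    · intro i hi
      rw [List.mem_range] at hi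
      simp only [pvP, decide_eq_true_eq]
      intro h
      have := h.length_le
      simp only [List.length_drop] at this
      omega
    · intro j hj
      rw [List.mem_range] at hj
      simp only [decide_eq_true_eq]
      intro h
      have := h.length_le
      simp only [List.length_take] at this
      omega

-- ===== VERDICT (by name: the statement is the Claim_ definition above) =====
theorem find_horizontally_spec : Claim_equal_find_horizontally := by
  intro matrix word _
  unfold Spec_find_horizontally find_horizontally find_horizontally_alt
  simp only [PySem.List.slice?_none_none_neg_one, Option.getD_some]
  rw [PySem.List.foldl_pyRange_zero_pyGetD' matrix ([] : List String)
      (fun acc row =>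
        acc + pvCountOcc ((PySem.Str.join "" row).toList.length + 2)
                (PySem.Str.join "" row).toList word.toList 0
            + pvCountOcc ((PySem.Str.join "" row).toList.length + 2)
                (PySem.Str.join "" row).toList word.toList.reverse 0) 0]
  congr 1
  funext acc row
  rw [pvCountOcc_zero, pvCountOcc_zero, pvOcc_eq, pvOcc_eq, pvShift, pvShift]
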